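-- pv_equiv track=rewrite | github.com/ibnu-asma/A2SV-competitive_programming | 09-Feb-2025/Almost Prime 252290.py | solve
-- ===== SOURCE A (Python) =====
-- import math
--
-- def is_prime(n):
--     if n <= 1:
--         return False
--     for i in range(2, int(math.sqrt(n)) + 1):
--         if n % i == 0:
--             return False
--     return True
--
-- def solve(n:int) ->int:
--     if n < 6:
--         return 0
--
--
--     count = 0
--     for i in range(6, n + 1):
--         # is_prime = True
--         current_count = 0
--         for num in range(i + 1):
--             divider  = num
--             if is_prime(divider):
--                 if i % divider == 0:
--                     current_count += 1
--         if current_count == 2: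
--             count += 1
--         current_count = 0
--
--     return count
-- ===== SOURCE B (Python) =====
-- def solve(n: int) -> int:
--     # Trial-division factorisation per number: count distinct prime factors
--     # by dividing them out, instead of primality-testing every candidate <= i.
--     if n < 6:
--         return 0
--     count = 0
--     for i in range(6, n + 1):
--         m = i
--         distinct = 0
--         d = 2
--         while d * d <= m:
--             if m % d == 0:
--                 distinct += 1
--                 while m % d == 0:
--                     m //= d
--             d += 1
--         if m > 1:
--             distinct += 1
--         if distinct == 2:
--             count += 1
--     return count
-- ===== Notes on version B (the rewrite author's own statement) =====
-- stated objective: faster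
-- what changed: Instead of running a sqrt-trial-division primality test on every candidate divisor 0..i for each i, B factorises each i directly by trial division (dividing each found factor out), counting distinct prime factors.
import Mathlib
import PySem

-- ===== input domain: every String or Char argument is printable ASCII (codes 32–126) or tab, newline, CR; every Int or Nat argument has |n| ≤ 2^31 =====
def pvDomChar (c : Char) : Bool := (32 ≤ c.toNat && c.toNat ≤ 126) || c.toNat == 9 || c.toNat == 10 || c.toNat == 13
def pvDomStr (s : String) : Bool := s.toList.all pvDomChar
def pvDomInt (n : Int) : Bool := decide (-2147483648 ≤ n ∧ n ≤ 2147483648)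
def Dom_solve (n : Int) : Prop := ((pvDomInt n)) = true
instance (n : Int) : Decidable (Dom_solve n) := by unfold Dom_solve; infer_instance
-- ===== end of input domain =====

-- B replaces A's "primality-test every number up to i" inner scan by trial-division
-- factorisation of each i (dividing prime factors out); measurably faster, same results.

-- ===== PORT A =====
-- int(math.sqrt(n)) is exact (equals the integer square root) for 0 ≤ n ≤ 2^31
def isPrimeA (n : Int) : Bool :=
  if n ≤ 1 then false
  else if (PySem.List.pyRange 2 ((Nat.sqrt n.toNat : Int) + 1) 1).any
            (fun i => PySem.Int.mod n i == 0) then false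
  else true

def solve (n : Int) : Int :=
  if n < 6 then 0
  else
    (PySem.List.pyRange 6 (n + 1) 1).foldl (fun count i =>
      let current_count : Int :=
        (PySem.List.pyRange 0 (i + 1) 1).foldl (fun c num =>
          let divider := num
          if isPrimeA divider then
            if PySem.Int.mod i divider == 0 then c + 1 else c
          else c) 0
      if current_count == 2 then count + 1 else count) 0

-- ===== PORT B =====
-- inner "while m % d == 0: m //= d"; the guard's extra conjuncts (2 ≤ d, 0 < m)
-- only make the recursion total — they hold at every call the program makes
def stripFactor (m d : Nat) : Nat :=
  if _h : m % d = 0 ∧ 2 ≤ d ∧ 0 < m then stripFactor (m / d) d else m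
termination_by m
decreasing_by exact Nat.div_lt_self _h.2.2 _h.2.1

theorem stripFactor_le (m d : Nat) : stripFactor m d ≤ m := by
  induction m using stripFactor.induct d with
  | case1 m h ih =>
    rw [stripFactor, dif_pos h]
    exact le_trans ih (Nat.le_of_lt (Nat.div_lt_self h.2.2 h.2.1))
  | case2 m h => rw [stripFactor, dif_neg h]

theorem stripFactor_lt (m d : Nat) (h1 : m % d = 0) (h2 : 2 ≤ d) (h3 : 0 < m) :
    stripFactor m d < m := by
  rw [stripFactor, dif_pos ⟨h1, h2, h3⟩]
  exact lt_of_le_of_lt (stripFactor_le _ _) (Nat.div_lt_self h3 h2)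

-- the "while d * d <= m" loop of B plus the final "if m > 1" bonus; the guard's
-- extra conjunct 2 ≤ d only makes the recursion total (d starts at 2 and grows)
def omegaFrom (m d : Nat) : Nat :=
  if h : d * d ≤ m ∧ 2 ≤ d then
    if hm : m % d = 0 then 1 + omegaFrom (stripFactor m d) (d + 1)
    else omegaFrom m (d + 1)
  else if 1 < m then 1 else 0
termination_by (m, m + 1 - d)
decreasing_by
  · exact Prod.Lex.left _ _ (stripFactor_lt m d hm h.2 (by nlinarith [h.1, h.2]))
  · have hdm : d ≤ m := le_trans (Nat.le_mul_of_pos_left d (by omega)) h.1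
    exact Prod.Lex.right _ (by omega)

def solve_alt (n : Int) : Int :=
  if n < 6 then 0
  else
    (PySem.List.pyRange 6 (n + 1) 1).foldl (fun count i =>
      if omegaFrom i.toNat 2 == 2 then count + 1 else count) 0

-- ===== PRECONDITION & SPEC =====
def Spec_solve (n : Int) (out : Int) : Prop := out = solve_alt n
instance (n : Int) (out : Int) : Decidable (Spec_solve n out) := by unfold Spec_solve; infer_instance

-- ===== CLAIM (what is proved, stated in full; the proofs are below) =====
def Claim_equal_solve : Prop := ∀ (n : Int), Dom_solve n → Spec_solve n (solve n)

-- ===== LEMMAS AND PROOFS =====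

-- A's trial-division primality test is correct
theorem isPrimeA_iff (k : Nat) : isPrimeA (k : Int) = true ↔ k.Prime := by
  unfold isPrimeA
  by_cases hk : (k : Int) ≤ 1
  · simp only [if_pos hk, Bool.false_eq_true, false_iff]
    intro hp
    have := hp.two_le
    omega
  · have hk2 : 2 ≤ k := by omega
    have htn : (k : Int).toNat = k := Int.toNat_natCast k
    rw [if_neg hk, htn]
    have hany : ((PySem.List.pyRange 2 ((Nat.sqrt k : Int) + 1) 1).any
        (fun i => PySem.Int.mod (k : Int) i == 0) = true)
        ↔ ∃ m : Nat, 2 ≤ m ∧ m ≤ Nat.sqrt k ∧ m ∣ k := by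
      rw [List.any_eq_true]
      constructor
      · rintro ⟨j, hj, hdvd⟩
        rw [PySem.List.mem_pyRange_one] at hj
        simp only [beq_iff_eq] at hdvd
        rw [PySem.Int.mod_eq_zero_iff_dvd] at hdvd
        refine ⟨j.toNat, by omega, by omega, ?_⟩
        have hj' : ((j.toNat : Nat) : Int) = j := by omega
        rw [← hj'] at hdvd
        exact_mod_cast hdvd
      · rintro ⟨m, hm2, hms, hmd⟩
        refine ⟨(m : Int), ?_, ?_⟩
        · rw [PySem.List.mem_pyRange_one]
          constructor
          · exact_mod_cast hm2
          · omega
        · simp only [beq_iff_eq]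
          rw [PySem.Int.mod_eq_zero_iff_dvd]
          exact_mod_cast hmd
    cases hb : (PySem.List.pyRange 2 ((Nat.sqrt k : Int) + 1) 1).any
        (fun i => PySem.Int.mod (k : Int) i == 0)
    · rw [if_neg (by simp)]
      have hp : k.Prime := by
        rw [Nat.prime_def_le_sqrt]
        refine ⟨hk2, fun m h1 h2 hd => ?_⟩
        rw [hb] at hany
        simp only [Bool.false_eq_true, false_iff, not_exists] at hany
        exact (hany m) ⟨h1, h2, hd⟩
      exact ⟨fun _ => hp, fun _ => rfl⟩
    · rw [if_pos rfl]
      have hnp : ¬ k.Prime := by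
        rw [hb] at hany
        obtain ⟨m, hm2, hms, hmd⟩ := hany.mp rfl
        rw [Nat.prime_def_le_sqrt]
        rintro ⟨-, hno⟩
        exact hno m hm2 hms hmd
      exact ⟨fun h => absurd h (by simp), fun hp => absurd hp hnp⟩

theorem countP_range_eq_card (N : Nat) (p : Nat → Prop) [DecidablePred p] :
    (List.range N).countP (fun k => decide (p k)) = ((Finset.range N).filter p).card := by
  induction N with
  | zero => simp
  | succ n ih =>
    rw [List.range_succ, List.countP_append, ih]
    by_cases hp : p n
    · rw [Finset.range_add_one, Finset.filter_insert, if_pos hp,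
        Finset.card_insert_of_notMem (by simp)]
      simp [hp]
    · rw [Finset.range_add_one, Finset.filter_insert, if_neg hp]
      simp [hp]

theorem filter_eq_primeFactors (N : Nat) (hN : 1 ≤ N) :
    (Finset.range (N + 1)).filter (fun k => k.Prime ∧ k ∣ N) = N.primeFactors := by
  ext p
  simp only [Finset.mem_filter, Finset.mem_range, Nat.mem_primeFactors]
  constructor
  · rintro ⟨-, hp, hd⟩
    exact ⟨hp, hd, by omega⟩
  · rintro ⟨hp, hd, -⟩
    have := Nat.le_of_dvd (by omega) hd
    exact ⟨by omega, hp, hd⟩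

-- A's inner loop over range(i+1) counts exactly the distinct prime factors of i
theorem inner_eq (i : Int) (hi : 6 ≤ i) :
    ((PySem.List.pyRange 0 (i + 1) 1).foldl (fun c num =>
        let divider := num
        if isPrimeA divider then
          if PySem.Int.mod i divider == 0 then c + 1 else c
        else c) (0 : Int))
    = ((i.toNat.primeFactors.card : Nat) : Int) := by
  have h1 : ((PySem.List.pyRange 0 (i + 1) 1).foldl (fun c num =>
        let divider := num
        if isPrimeA divider then
          if PySem.Int.mod i divider == 0 then c + 1 else c
        else c) (0 : Int))
      = ((PySem.List.pyRange 0 (i + 1) 1).foldl (fun c num =>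
          if (isPrimeA num && (PySem.Int.mod i num == 0)) then c + 1 else c) (0 : Int)) := by
    refine PySem.List.foldl_congr_mem' _ _ _ _ ?_
    intro x _ acc
    cases hx : isPrimeA x <;> simp [hx]
  rw [h1, PySem.List.foldl_if_add_one, PySem.List.pyRange_one, List.countP_map]
  have h2 : ((i + 1) - 0).toNat = i.toNat + 1 := by omega
  rw [h2]
  have h3 : (List.range (i.toNat + 1)).countP
        ((fun num => isPrimeA num && (PySem.Int.mod i num == 0)) ∘ fun k : Nat => 0 + (k : Int))
      = (List.range (i.toNat + 1)).countP (fun k : Nat => decide (k.Prime ∧ k ∣ i.toNat)) := by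
    refine List.countP_congr ?_
    intro k _
    simp only [Function.comp_apply, zero_add, Bool.and_eq_true, beq_iff_eq,
      decide_eq_true_eq]
    rw [isPrimeA_iff, PySem.Int.mod_eq_zero_iff_dvd]
    have hiv : ((i.toNat : Nat) : Int) = i := by omega
    constructor
    · rintro ⟨hp, hd⟩
      rw [← hiv] at hd
      exact ⟨hp, by exact_mod_cast hd⟩
    · rintro ⟨hp, hd⟩
      exact ⟨hp, by rw [← hiv]; exact_mod_cast hd⟩
  rw [h3, countP_range_eq_card, filter_eq_primeFactors i.toNat (by omega)]
  omega

-- stripFactor facts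
theorem stripFactor_pos (m d : Nat) : 0 < m → 0 < stripFactor m d := by
  induction m using stripFactor.induct d with
  | case1 m h ih =>
    intro _
    rw [stripFactor, dif_pos h]
    exact ih (Nat.div_pos (Nat.le_of_dvd h.2.2 (Nat.dvd_of_mod_eq_zero h.1)) (by omega))
  | case2 m h =>
    intro hm
    rwa [stripFactor, dif_neg h]

theorem stripFactor_dvd (m d : Nat) : stripFactor m d ∣ m := by
  induction m using stripFactor.induct d with
  | case1 m h ih =>
    rw [stripFactor, dif_pos h]
    exact ih.trans (Nat.div_dvd_of_dvd (Nat.dvd_of_mod_eq_zero h.1))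
  | case2 m h => rw [stripFactor, dif_neg h]

theorem not_dvd_stripFactor (m d : Nat) (hd : 2 ≤ d) : 0 < m → ¬ d ∣ stripFactor m d := by
  induction m using stripFactor.induct d with
  | case1 m h ih =>
    intro _
    rw [stripFactor, dif_pos h]
    exact ih (Nat.div_pos (Nat.le_of_dvd h.2.2 (Nat.dvd_of_mod_eq_zero h.1)) (by omega))
  | case2 m h =>
    intro hm hdvd
    rw [stripFactor, dif_neg h] at hdvd
    exact h ⟨Nat.mod_eq_zero_of_dvd hdvd, hd, hm⟩

theorem exists_pow_stripFactor (m d : Nat) : ∃ k, m = stripFactor m d * d ^ k := by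
  induction m using stripFactor.induct d with
  | case1 m h ih =>
    obtain ⟨k, hk⟩ := ih
    refine ⟨k + 1, ?_⟩
    rw [stripFactor, dif_pos h, pow_succ, ← mul_assoc, ← hk]
    exact (Nat.div_mul_cancel (Nat.dvd_of_mod_eq_zero h.1)).symm
  | case2 m h =>
    exact ⟨0, by rw [stripFactor, dif_neg h, pow_zero, mul_one]⟩

theorem primeFactors_stripFactor (m d : Nat) (hd : d.Prime) (hm : 0 < m) :
    (stripFactor m d).primeFactors = m.primeFactors.erase d := by
  ext p
  have hs0 : stripFactor m d ≠ 0 := (stripFactor_pos m d hm).ne'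
  simp only [Nat.mem_primeFactors, Finset.mem_erase, hm.ne', hs0, ne_eq,
    not_false_eq_true, and_true]
  constructor
  · rintro ⟨hp, hpd⟩
    refine ⟨fun hpeq => (not_dvd_stripFactor m d hd.two_le hm) (hpeq ▸ hpd), hp,
      hpd.trans (stripFactor_dvd m d)⟩
  · rintro ⟨hne, hp, hpm⟩
    obtain ⟨k, hk⟩ := exists_pow_stripFactor m d
    rw [hk] at hpm
    rcases (Nat.Prime.dvd_mul hp).mp hpm with hps | hpk
    · exact ⟨hp, hps⟩
    · exact absurd ((Nat.prime_dvd_prime_iff_eq hp hd).mp (hp.dvd_of_dvd_pow hpk)) hne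

-- B's trial-division loop computes the number of distinct prime factors
theorem omegaFrom_eq : ∀ m d : Nat, 0 < m → 2 ≤ d →
    (∀ p, p.Prime → p ∣ m → d ≤ p) → omegaFrom m d = m.primeFactors.card := by
  intro m d
  induction m, d using omegaFrom.induct with
  | case1 m d h hm ih =>
    intro h0 hd hfac
    have hdvd : d ∣ m := Nat.dvd_of_mod_eq_zero hm
    have hdp : d.Prime := by
      have h1 := Nat.minFac_prime (show d ≠ 1 by omega)
      have h3 := hfac _ h1 ((Nat.minFac_dvd d).trans hdvd)
      have h4 := Nat.minFac_le (show 0 < d by omega)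
      rwa [le_antisymm h4 h3] at h1
    have hspos := stripFactor_pos m d h0
    have hrec := ih hspos (by omega) (fun p hp hpd => by
      have hge := hfac p hp (hpd.trans (stripFactor_dvd m d))
      have hne : p ≠ d := fun hpeq =>
        (not_dvd_stripFactor m d (by omega) h0) (hpeq ▸ hpd)
      omega)
    have hdmem : d ∈ m.primeFactors := Nat.mem_primeFactors.mpr ⟨hdp, hdvd, h0.ne'⟩
    have hcard : 1 ≤ m.primeFactors.card := Finset.card_pos.mpr ⟨d, hdmem⟩
    rw [omegaFrom, dif_pos h, dif_pos hm, hrec,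
      primeFactors_stripFactor m d hdp h0, Finset.card_erase_of_mem hdmem]
    omega
  | case2 m d h hm ih =>
    intro h0 hd hfac
    rw [omegaFrom, dif_pos h, dif_neg hm]
    refine ih h0 (by omega) (fun p hp hpd => ?_)
    have hge := hfac p hp hpd
    have hne : p ≠ d := fun hpeq =>
      hm (Nat.mod_eq_zero_of_dvd (hpeq ▸ hpd))
    omega
  | case3 m d h h1 =>
    intro h0 hd hfac
    have hlt : m < d * d := by
      by_contra hc
      exact h ⟨by omega, hd⟩
    rw [omegaFrom, dif_neg h, if_pos h1]
    have hmp : m.Prime := by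
      have hq := Nat.minFac_prime (show m ≠ 1 by omega)
      have hqd : m.minFac ∣ m := Nat.minFac_dvd m
      have hdq : d ≤ m.minFac := hfac _ hq hqd
      by_cases hr1 : m / m.minFac = 1
      · have h' := Nat.mul_div_cancel' hqd
        rw [hr1, mul_one] at h'
        exact h' ▸ hq
      · exfalso
        have hr0 : 0 < m / m.minFac := Nat.div_pos (Nat.minFac_le h0) hq.pos
        have hs := Nat.minFac_prime (show m / m.minFac ≠ 1 from hr1)
        have hsd : (m / m.minFac).minFac ∣ m := (Nat.minFac_dvd _).trans
          (Nat.div_dvd_of_dvd hqd)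
        have hds : d ≤ (m / m.minFac).minFac := hfac _ hs hsd
        have hsle : (m / m.minFac).minFac ≤ m / m.minFac := Nat.minFac_le hr0
        have : d * d ≤ m.minFac * (m / m.minFac) :=
          Nat.mul_le_mul hdq (le_trans hds hsle)
        rw [Nat.mul_div_cancel' hqd] at this
        omega
    rw [hmp.primeFactors]
    simp
  | case4 m d h h1 =>
    intro h0 hd hfac
    have hm1 : m = 1 := by omega
    rw [omegaFrom, dif_neg h, if_neg h1, hm1]
    simp

theorem solve_eq_solve_alt (n : Int) : solve n = solve_alt n := by
  unfold solve solve_alt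
  by_cases h6 : n < 6
  · simp [h6]
  · rw [if_neg h6, if_neg h6]
    refine PySem.List.foldl_congr_mem' _ _ _ _ ?_
    intro i hi acc
    rw [PySem.List.mem_pyRange_one] at hi
    have hω := inner_eq i hi.1
    simp only [hω]
    have homega : omegaFrom i.toNat 2 = i.toNat.primeFactors.card :=
      omegaFrom_eq i.toNat 2 (by omega) le_rfl (fun p hp _ => hp.two_le)
    have hcond : ((i.toNat.primeFactors.card : Int) == (2 : Int))
        = (omegaFrom i.toNat 2 == 2) := by
      rw [Bool.eq_iff_iff]
      simp only [beq_iff_eq, homega]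
      omega
    rw [hcond]

-- ===== VERDICT (by name: the statement is the Claim_ definition above) =====
theorem solve_spec : Claim_equal_solve := by
  intro n _
  unfold Spec_solve
  exact solve_eq_solve_alt n
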